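-- pv_equiv track=rewrite | github.com/Timooo-dnn/GPS-mieux-que-maps-site | src/algorithms.py | trivoisines
-- ===== SOURCE A (Python) =====
-- def trivoisines(voisines):
--     voisinestriées = []
--     while len(voisines) > 0 :
--         if len(voisines) == 1 :
--             voisinestriées.append(voisines[0][0])
--             del voisines[0]
--         else :
--             imin=0; i=1
--             while i < len(voisines) :
--                 if voisines[imin][1] > voisines[i][1] :
--                     imin = i
--                 i += 1
--             voisinestriées.append(voisines[imin][0])
--             del voisines[imin]
--     return voisinestriées
-- ===== SOURCE B (Python) =====
-- def trivoisines(voisines):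
--     # stable sort by second component (ties keep original order, like A's
--     # first-minimum selection), then keep the first components;
--     # clear voisines to reproduce A's emptying of its argument.
--     result = [x for x, _ in sorted(voisines, key=lambda p: p[1])]
--     voisines.clear()
--     return result
-- ===== Notes on version B (the rewrite author's own statement) =====
-- stated objective: faster
-- what changed: Replaces A's repeated linear min-scan selection (with in-place deletion) by one stable library sort keyed on the second component followed by a projection to first components.
import Mathlib
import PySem

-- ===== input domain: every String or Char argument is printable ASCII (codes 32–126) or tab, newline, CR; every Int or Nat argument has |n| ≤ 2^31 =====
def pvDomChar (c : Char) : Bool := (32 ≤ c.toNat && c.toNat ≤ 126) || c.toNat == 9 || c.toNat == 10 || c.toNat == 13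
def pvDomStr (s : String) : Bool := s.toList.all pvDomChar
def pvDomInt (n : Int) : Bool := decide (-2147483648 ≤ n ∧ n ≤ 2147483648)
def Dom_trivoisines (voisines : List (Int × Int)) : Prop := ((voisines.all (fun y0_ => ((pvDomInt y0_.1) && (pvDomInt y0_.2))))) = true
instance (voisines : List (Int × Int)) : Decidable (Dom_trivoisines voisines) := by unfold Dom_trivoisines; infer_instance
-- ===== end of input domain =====

-- B replaces A's quadratic first-minimum selection by one stable sort on the second
-- component plus a projection (faster). Both Pythons empty `voisines` in place; the
-- equivalence proved here is about the RETURN value.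

-- ===== PORT A =====
-- inner while loop computing imin (first index of minimal second component)
def trivoisinesMinIdx (voisines : List (Int × Int)) : Int :=
  (PySem.List.pyRange 1 (voisines.length : Int) 1).foldl
    (fun imin i =>
      if (PySem.List.pyGetD voisines imin ((0:Int),(0:Int))).2 >
         (PySem.List.pyGetD voisines i ((0:Int),(0:Int))).2 then i else imin) 0

-- outer while loop; fuel = initial length (each iteration deletes one element).
-- del voisines[imin] → eraseIdx imin.toNat: exact, since 0 ≤ imin < len (proved below).
def trivoisinesLoop : Nat → List Int → List (Int × Int) → List Int
  | 0, acc, _ => acc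
  | fuel+1, acc, voisines =>
    if 0 < voisines.length then
      if voisines.length = 1 then
        trivoisinesLoop fuel (acc ++ [(PySem.List.pyGetD voisines 0 ((0:Int),(0:Int))).1])
          (voisines.eraseIdx 0)
      else
        let imin := trivoisinesMinIdx voisines
        trivoisinesLoop fuel (acc ++ [(PySem.List.pyGetD voisines imin ((0:Int),(0:Int))).1])
          (voisines.eraseIdx imin.toNat)
    else acc

def trivoisines (voisines : List (Int × Int)) : List Int :=
  trivoisinesLoop voisines.length [] voisines

-- ===== PORT B =====
def trivoisines_alt (voisines : List (Int × Int)) : List Int :=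
  (PySem.List.sorted voisines (fun p => p.2)).map (fun p => p.1)

-- ===== PRECONDITION & SPEC =====
def Spec_trivoisines (voisines : List (Int × Int)) (out : List Int) : Prop := out = trivoisines_alt voisines
instance (voisines : List (Int × Int)) (out : List Int) : Decidable (Spec_trivoisines voisines out) := by unfold Spec_trivoisines; infer_instance

-- ===== CLAIM (what is proved, stated in full; the proofs are below) =====
def Claim_equal_trivoisines : Prop := ∀ (voisines : List (Int × Int)), Dom_trivoisines voisines → Spec_trivoisines voisines (trivoisines voisines)

-- ===== LEMMAS AND PROOFS =====

-- `j` is the first index of v[0..c) whose second component is minimal there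
def pvFA (v : List (Int × Int)) (j c : Nat) : Prop :=
  j < c ∧ (∀ t, t < c → (v.getD j (0,0)).2 ≤ (v.getD t (0,0)).2)
        ∧ (∀ t, t < j → (v.getD j (0,0)).2 < (v.getD t (0,0)).2)

-- invariant of the inner min-scan fold
lemma pvFoldInv (v : List (Int × Int)) :
    ∀ (m : Nat) (c : Int) (j : Nat), ((v.length : Int) - c).toNat ≤ m →
      0 ≤ c → (j : Int) < c → c ≤ (v.length : Int) → pvFA v j c.toNat →
      ∃ r : Nat,
        (PySem.List.pyRange c (v.length : Int) 1).foldl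
          (fun imin i =>
            if (PySem.List.pyGetD v imin ((0:Int),(0:Int))).2 >
               (PySem.List.pyGetD v i ((0:Int),(0:Int))).2 then i else imin) (j : Int)
          = (r : Int) ∧ pvFA v r v.length := by
  intro m
  induction m with
  | zero =>
    intro c j hm hc hjc hcn hFA
    have hceq : c = (v.length : Int) := by omega
    subst hceq
    rw [PySem.List.pyRange_one_eq_nil (le_refl _)]
    exact ⟨j, rfl, by simpa using hFA⟩
  | succ m ih =>
    intro c j hm hc hjc hcn hFA
    rcases eq_or_lt_of_le hcn with hceq | hlt
    · subst hceq
      rw [PySem.List.pyRange_one_eq_nil (le_refl _)]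
      exact ⟨j, rfl, by simpa using hFA⟩
    · rw [PySem.List.pyRange_one_cons hlt]
      simp only [List.foldl_cons]
      have hcnat : c = ((c.toNat : Nat) : Int) := by omega
      have hgj : PySem.List.pyGetD v (j : Int) ((0:Int),(0:Int)) = v.getD j (0,0) := by
        simp [PySem.List.pyGetD_natCast]
      have hgc : PySem.List.pyGetD v c ((0:Int),(0:Int)) = v.getD c.toNat (0,0) := by
        conv_lhs => rw [hcnat]
        exact PySem.List.pyGetD_natCast ..
      obtain ⟨hjc', hle, hlt'⟩ := hFA
      by_cases hgt : (v.getD j (0,0)).2 > (v.getD c.toNat (0,0)).2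
      · rw [if_pos (by rw [hgj, hgc]; exact hgt)]
        rw [hcnat]
        refine ih ((c.toNat : Int) + 1) c.toNat (by omega) (by omega) (by omega) (by omega) ?_
        refine ⟨by omega, ?_, ?_⟩
        · intro t ht
          rcases Nat.lt_or_ge t c.toNat with h | h
          · exact le_of_lt (lt_of_lt_of_le hgt (hle t h))
          · have : t = c.toNat := by omega
            subst this; exact le_refl _
        · intro t ht
          exact lt_of_lt_of_le hgt (hle t ht)
      · rw [if_neg (by rw [hgj, hgc]; exact hgt)]
        refine ih (c + 1) j (by omega) (by omega) (by omega) (by omega) ?_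
        refine ⟨by omega, ?_, hlt'⟩
        intro t ht
        rcases Nat.lt_or_ge t c.toNat with h | h
        · exact hle t h
        · have : t = c.toNat := by omega
          subst this; omega

lemma pvMinIdxSpec (v : List (Int × Int)) (hv : 1 ≤ v.length) :
    ∃ r : Nat, trivoisinesMinIdx v = (r : Int) ∧ pvFA v r v.length := by
  have h0 : pvFA v 0 ((1:Int).toNat) := by
    refine ⟨by simp, ?_, by omega⟩
    intro t ht
    have : t = 0 := by simp at ht; omega
    subst this; exact le_refl _
  have := pvFoldInv v v.length 1 0 (by omega) (by omega) (by omega)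
    (by exact_mod_cast hv) h0
  simpa [trivoisinesMinIdx] using this

-- insertBy puts x in front when it goes before every element
lemma pvInsertFront (before : (Int × Int) → (Int × Int) → Bool) (x : Int × Int)
    (ys : List (Int × Int)) (h : ∀ y ∈ ys, before x y = true) :
    PySem.List.insertBy before x ys = x :: ys := by
  cases ys with
  | nil => simp [PySem.List.insertBy]
  | cons y ys => simp [PySem.List.insertBy, h y (by simp)]

-- a head that goes before everything inserted later stays in front
lemma pvPullHead (m : Int × Int) (q : List (Int × Int)) :
    ∀ (S : List (Int × Int)), (∀ z ∈ q, m.2 ≤ z.2) →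
    q.foldl (fun acc x => PySem.List.insertBy (fun a b => decide (a.2 < b.2)) x acc) (m :: S)
      = m :: q.foldl (fun acc x => PySem.List.insertBy (fun a b => decide (a.2 < b.2)) x acc) S := by
  induction q with
  | nil => intro S _; rfl
  | cons z q ih =>
    intro S hq
    simp only [List.foldl_cons]
    have hz : (decide (z.2 < m.2)) = false := by
      simp; exact hq z (by simp)
    rw [show PySem.List.insertBy (fun a b => decide (a.2 < b.2)) z (m :: S)
          = m :: PySem.List.insertBy (fun a b => decide (a.2 < b.2)) z S from by
        simp [PySem.List.insertBy, hz]]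
    exact ih (PySem.List.insertBy (fun a b => decide (a.2 < b.2)) z S)
      (fun w hw => hq w (by simp [hw]))

-- extract-first-minimum decomposition of the stable sort
lemma pvExtMin (m : Int × Int) (p q : List (Int × Int))
    (hp : ∀ y ∈ p, m.2 < y.2) (hq : ∀ y ∈ q, m.2 ≤ y.2) :
    PySem.List.sorted (p ++ m :: q) (fun x => x.2)
      = m :: PySem.List.sorted (p ++ q) (fun x => x.2) := by
  rw [PySem.List.sorted_eq_foldl_insertBy, PySem.List.sorted_eq_foldl_insertBy]
  rw [show p ++ m :: q = (p ++ [m]) ++ q from by simp]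
  rw [List.foldl_append, List.foldl_append, List.foldl_append]
  simp only [List.foldl_cons, List.foldl_nil]
  have hSmem : ∀ y ∈ p.foldl (fun acc x => PySem.List.insertBy (fun a b => decide (a.2 < b.2)) x acc) [], y ∈ p := by
    intro y hy
    have : y ∈ PySem.List.sorted p (fun x => x.2) := by
      rw [PySem.List.sorted_eq_foldl_insertBy]; exact hy
    exact (PySem.List.mem_sorted _ _ _ _).mp this
  rw [pvInsertFront _ m _ (fun y hy => by simp; exact hp y (hSmem y hy))]
  exact pvPullHead m q _ hq

-- main loop invariant
lemma pvLoopEq : ∀ (m : Nat) (v : List (Int × Int)) (acc : List Int), v.length ≤ m →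
    trivoisinesLoop m acc v = acc ++ (PySem.List.sorted v (fun p => p.2)).map (fun p => p.1) := by
  intro m
  induction m with
  | zero =>
    intro v acc hm
    have : v = [] := List.eq_nil_of_length_eq_zero (by omega)
    subst this
    simp [trivoisinesLoop, PySem.List.sorted_eq_foldl_insertBy]
  | succ m ih =>
    intro v acc hm
    cases v with
    | nil => simp [trivoisinesLoop, PySem.List.sorted_eq_foldl_insertBy]
    | cons x xs =>
      by_cases h1 : (x :: xs).length = 1
      · have hxs : xs = [] := by
          cases xs with
          | nil => rfl
          | cons a l => simp at h1
        subst hxs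
        simp only [trivoisinesLoop, if_pos h1]
        rw [ih _ _ (by simp)]
        simp [PySem.List.pyGetD_zero_cons, PySem.List.sorted_eq_foldl_insertBy,
          PySem.List.insertBy]
      · set v := x :: xs with hv
        have hlen2 : 2 ≤ v.length := by
          have : 1 ≤ v.length := by simp [hv]
          omega
        obtain ⟨r, hr, hrlt, hle, hlt⟩ := pvMinIdxSpec v (by omega)
        simp only [trivoisinesLoop, if_pos (by omega : 0 < v.length), if_neg h1]
        rw [hr]
        have hrt : ((r : Int)).toNat = r := Int.toNat_natCast r
        have hget : PySem.List.pyGetD v (r : Int) ((0:Int),(0:Int)) = v.getD r (0,0) := by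
          simp [PySem.List.pyGetD_natCast]
        rw [hget, hrt]
        have hdecomp : v = v.take r ++ v.getD r (0,0) :: v.drop (r + 1) := by
          conv_lhs => rw [← List.take_append_drop r v]
          congr 1
          rw [List.getD_eq_getElem _ _ hrlt]
          exact (List.drop_eq_getElem_cons hrlt).symm ▸ rfl
        have herase : v.eraseIdx r = v.take r ++ v.drop (r + 1) :=
          List.eraseIdx_eq_take_drop_succ v r
        rw [ih _ _ (by rw [herase]; simp; omega)]
        have hmin : PySem.List.sorted v (fun p => p.2)
            = v.getD r (0,0) :: PySem.List.sorted (v.eraseIdx r) (fun p => p.2) := by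
          conv_lhs => rw [hdecomp]
          rw [herase]
          apply pvExtMin
          · intro y hy
            obtain ⟨t, ht, hty⟩ := List.mem_take_iff_getElem.mp hy
            have ht' : t < r := lt_of_lt_of_le ht (min_le_left _ _)
            have h2 := hlt t ht'
            rw [show v.getD t (0,0) = v[t]'(lt_of_lt_of_le ht (min_le_right _ _)) from
              List.getD_eq_getElem _ _ _] at h2
            rw [hty] at h2
            exact h2
          · intro y hy
            obtain ⟨t, ht, hty⟩ := List.mem_drop_iff_getElem.mp hy
            have h2 := hle (r + 1 + t) (by omega)
            rw [show v.getD (r + 1 + t) (0,0) = v[r + 1 + t]'(by omega) from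
              List.getD_eq_getElem _ _ _] at h2
            rw [hty] at h2
            exact h2
        rw [hmin]
        simp

-- ===== VERDICT (by name: the statement is the Claim_ definition above) =====
theorem trivoisines_spec : Claim_equal_trivoisines := by
  intro v _
  show trivoisines v = trivoisines_alt v
  unfold trivoisines trivoisines_alt
  exact pvLoopEq v.length v [] (le_refl _)
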